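-- pv_equiv track=rewrite | github.com/terracorp-private/AoC | 2015/3.py | robo_santa_moves
-- ===== SOURCE A (Python) =====
-- def robo_santa_moves(line: list[str]) -> set:
--     x: int = 0
--     y: int = 0
--     xr : int = 0
--     yr : int = 0
--     santa_trail: list[int] = []
--     robo_santa_trail: list[int] = []
--     for turn, movement in enumerate(line):
--         if turn % 2 == 0:
--             if movement == '^':
--                 y += 1
--             elif movement == 'v':
--                 y -= 1
--             elif movement == '>':
--                 x += 1
--             else:
--                 x -= 1
--             coords: tuple(int,int) = (x,y)
--             santa_trail.append(coords)
--         else: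
--             if movement == '^':
--                 yr += 1
--             elif movement == 'v':
--                 yr -= 1
--             elif movement == '>':
--                 xr += 1
--             else:
--                 xr -= 1
--             robo_coords: tuple(int,int) = (xr,yr)
--             robo_santa_trail.append(robo_coords)
--     santa: set = set(santa_trail)
--     robo_santa: set = set(robo_santa_trail)
--     houses: set = santa.union(robo_santa)
--     return houses
-- ===== SOURCE B (Python) =====
-- def robo_santa_moves(line: list[str]) -> set:
--     # Split-first decomposition: santa takes the even-indexed moves, robo the
--     # odd-indexed ones; each walks independently and collects visited houses.
--     delta = {'^': (0, 1), 'v': (0, -1), '>': (1, 0)}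
--
--     def walk(moves):
--         x = y = 0
--         houses = set()
--         for m in moves:
--             dx, dy = delta.get(m, (-1, 0))
--             x += dx
--             y += dy
--             houses.add((x, y))
--         return houses
--
--     return walk(line[0::2]) | walk(line[1::2])
-- ===== Notes on version B (the rewrite author's own statement) =====
-- stated objective: alternative
-- what changed: Replaces the single interleaved loop with modulo-on-index dispatch and two trail lists turned into sets at the end by a split-first decomposition: slice the moves into santa's (even-index) and robo's (odd-index) halves, run one independent scan per half using a dict of deltas that builds its visited-set as it goes, and union the two sets.
import Mathlib
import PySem

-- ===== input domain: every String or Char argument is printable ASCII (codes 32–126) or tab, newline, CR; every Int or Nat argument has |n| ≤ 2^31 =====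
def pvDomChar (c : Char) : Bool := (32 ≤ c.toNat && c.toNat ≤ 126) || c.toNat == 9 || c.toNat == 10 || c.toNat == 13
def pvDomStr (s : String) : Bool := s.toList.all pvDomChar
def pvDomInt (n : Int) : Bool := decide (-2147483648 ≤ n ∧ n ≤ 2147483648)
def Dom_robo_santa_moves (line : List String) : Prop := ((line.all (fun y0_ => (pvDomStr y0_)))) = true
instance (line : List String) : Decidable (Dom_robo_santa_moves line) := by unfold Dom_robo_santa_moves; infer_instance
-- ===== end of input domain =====

-- B replaces A's single interleaved loop (dispatching on turn % 2 into two trail lists made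
-- into sets at the end) by a split-first decomposition: slice the moves into santa's
-- (even-index) and robo's (odd-index) halves, run one independent scan per half with a
-- dict of deltas that builds its visited-set as it walks, and union the two sets.

-- ===== PORT A =====
def robo_santa_moves (line : List String) : List (Int × Int) :=
  let st := (PySem.List.enumerate line).foldl
    (fun (acc : Int × Int × Int × Int × List (Int × Int) × List (Int × Int)) tm =>
      let turn := tm.1
      let movement := tm.2
      let x := acc.1; let y := acc.2.1
      let xr := acc.2.2.1; let yr := acc.2.2.2.1
      let santa_trail := acc.2.2.2.2.1; let robo_santa_trail := acc.2.2.2.2.2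
      if PySem.Int.mod turn 2 = 0 then
        let coords : Int × Int :=
          if movement = "^" then (x, y + 1)
          else if movement = "v" then (x, y - 1)
          else if movement = ">" then (x + 1, y)
          else (x - 1, y)
        (coords.1, coords.2, xr, yr, santa_trail ++ [coords], robo_santa_trail)
      else
        let robo_coords : Int × Int :=
          if movement = "^" then (xr, yr + 1)
          else if movement = "v" then (xr, yr - 1)
          else if movement = ">" then (xr + 1, yr)
          else (xr - 1, yr)
        (x, y, robo_coords.1, robo_coords.2, santa_trail, robo_santa_trail ++ [robo_coords]))
    (0, 0, 0, 0, [], [])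
  PySem.Set.union (PySem.Set.ofList st.2.2.2.2.1) (PySem.Set.ofList st.2.2.2.2.2)

-- ===== PORT B =====
-- delta.get(m, (-1, 0))
def rsmDelta (m : String) : Int × Int :=
  PySem.Dict.getD (PySem.Dict.ofList [("^", ((0 : Int), (1 : Int))), ("v", (0, -1)), (">", (1, 0))]) m (-1, 0)

-- walk(moves): scan from (0,0), adding each post-move position to a set
def rsmWalk (moves : List String) : PySem.Set (Int × Int) :=
  (moves.foldl
    (fun (acc : Int × Int × PySem.Set (Int × Int)) m =>
      let d := rsmDelta m
      let x := acc.1 + d.1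
      let y := acc.2.1 + d.2
      (x, y, PySem.Set.add acc.2.2 (x, y)))
    (0, 0, PySem.Set.empty)).2.2

-- slice? with step 2 is never none; .getD [] only discharges the Option (Python's line[0::2]).
def robo_santa_moves_alt (line : List String) : List (Int × Int) :=
  PySem.Set.union
    (rsmWalk ((PySem.List.slice? line (some 0) none 2).getD []))
    (rsmWalk ((PySem.List.slice? line (some 1) none 2).getD []))

-- ===== PRECONDITION & SPEC =====
def Spec_robo_santa_moves (line : List String) (out : List (Int × Int)) : Prop := out = robo_santa_moves_alt line
instance (line : List String) (out : List (Int × Int)) : Decidable (Spec_robo_santa_moves line out) := by unfold Spec_robo_santa_moves; infer_instance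

-- ===== CLAIM (what is proved, stated in full; the proofs are below) =====
def Claim_equal_robo_santa_moves : Prop := ∀ (line : List String), Dom_robo_santa_moves line → Spec_robo_santa_moves line (robo_santa_moves line)

-- ===== LEMMAS AND PROOFS =====

-- even-index / odd-index elements, structurally
def rsmEvens {α : Type} : List α → List α
  | [] => []
  | [a] => [a]
  | a :: _ :: l => a :: rsmEvens l

def rsmOdds {α : Type} : List α → List α
  | [] => []
  | [_] => []
  | _ :: b :: l => b :: rsmOdds l

-- walk from p: final position and the list of post-move positions, in order
def rsmWalkTo (p : Int × Int) : List String → (Int × Int) × List (Int × Int)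
  | [] => (p, [])
  | m :: ms =>
    let d := rsmDelta m
    let p' := (p.1 + d.1, p.2 + d.2)
    let r := rsmWalkTo p' ms
    (r.1, p' :: r.2)

-- A's if/elif chain computes exactly B's dict lookup applied as a delta
theorem rsmDelta_eq (m : String) (x y : Int) :
    (if m = "^" then (x, y + 1)
     else if m = "v" then (x, y - 1)
     else if m = ">" then (x + 1, y)
     else (x - 1, y)) = (x + (rsmDelta m).1, y + (rsmDelta m).2) := by
  by_cases h1 : m = "^"
  · subst h1
    have h : rsmDelta "^" = (0, 1) := by decide
    simp [h]
  · by_cases h2 : m = "v"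
    · subst h2
      have h : rsmDelta "v" = (0, -1) := by decide
      simp [h, show ¬ ("v" : String) = "^" from by decide, Prod.ext_iff]
      ring
    · by_cases h3 : m = ">"
      · subst h3
        have h : rsmDelta ">" = (1, 0) := by decide
        simp [h, show ¬ (">" : String) = "^" from by decide,
          show ¬ (">" : String) = "v" from by decide]
      · have e1 : (("^" : String) == m) = false := by simp [Ne.symm h1]
        have e2 : (("v" : String) == m) = false := by simp [Ne.symm h2]
        have e3 : ((">" : String) == m) = false := by simp [Ne.symm h3]
        have hd : PySem.Dict.ofList [("^", ((0 : Int), (1 : Int))), ("v", (0, -1)), (">", (1, 0))]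
            = PySem.Dict.mk [("^", ((0 : Int), (1 : Int))), ("v", (0, -1)), (">", (1, 0))] := by rfl
        have h : rsmDelta m = (-1, 0) := by
          simp [rsmDelta, hd, PySem.Dict.getD_eq_get?_getD,
            PySem.Dict.get?_mk_cons, e1, e2, e3,
            show PySem.Dict.mk ([] : List (String × Int × Int)) = PySem.Dict.empty from rfl,
            PySem.Dict.get?_empty]
        simp [h1, h2, h3, h, Prod.ext_iff]
        ring

theorem rsm_filterMap_evens {α : Type} : ∀ (xs : List α),
    (List.range ((xs.length + 1) / 2)).filterMap (fun k => xs[2 * k]?) = rsmEvens xs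
  | [] => by simp [rsmEvens]
  | [a] => by simp [rsmEvens, List.range_succ]
  | a :: b :: l => by
    have ih := rsm_filterMap_evens l
    simp only [List.length_cons]
    have hc : (l.length + 2 + 1) / 2 = (l.length + 1) / 2 + 1 := by omega
    rw [hc, List.range_succ_eq_map, List.filterMap_cons, List.filterMap_map]
    simp only [Nat.mul_zero]
    show (a :: b :: l)[0]?.toList ++ _ = rsmEvens (a :: b :: l)
    simp only [List.getElem?_cons_zero, Option.toList_some, rsmEvens]
    rw [List.singleton_append]
    refine congrArg (a :: ·) ?_ |>.trans rfl
    refine (List.filterMap_congr ?_).trans ih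
    intro k _
    show (a :: b :: l)[2 * Nat.succ k]? = l[2 * k]?
    have : 2 * Nat.succ k = 2 * k + 1 + 1 := by omega
    rw [this]
    simp

-- line[0::2] is the even-index sublist
theorem rsm_slice_evens {α : Type} (xs : List α) :
    (PySem.List.slice? xs (some 0) none 2).getD [] = rsmEvens xs := by
  simp only [PySem.List.slice?, PySem.List.sliceIndices]
  norm_num
  have hc : (if 0 < xs.length then (((xs.length : Int) + 2 - 1) / 2).toNat else 0)
      = (xs.length + 1) / 2 := by split <;> omega
  rw [hc]
  refine (List.filterMap_congr ?_).trans (rsm_filterMap_evens xs)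
  intro k _
  have : (2 * (k : Int)).toNat = 2 * k := by omega
  rw [this]

theorem rsm_filterMap_odds {α : Type} : ∀ (xs : List α),
    (List.range (xs.length / 2)).filterMap (fun k => xs[2 * k + 1]?) = rsmOdds xs
  | [] => by simp [rsmOdds]
  | [a] => by simp [rsmOdds]
  | a :: b :: l => by
    have ih := rsm_filterMap_odds l
    simp only [List.length_cons]
    have hc : (l.length + 2) / 2 = l.length / 2 + 1 := by omega
    rw [hc, List.range_succ_eq_map, List.filterMap_cons, List.filterMap_map]
    show (a :: b :: l)[1]?.toList ++ _ = rsmOdds (a :: b :: l)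
    simp only [List.getElem?_cons_succ, List.getElem?_cons_zero, Option.toList_some, rsmOdds]
    rw [List.singleton_append]
    refine congrArg (b :: ·) ?_ |>.trans rfl
    refine (List.filterMap_congr ?_).trans ih
    intro k _
    show (a :: b :: l)[2 * Nat.succ k + 1]? = l[2 * k + 1]?
    have : 2 * Nat.succ k + 1 = 2 * k + 1 + 1 + 1 := by omega
    rw [this]
    simp

-- line[1::2] is the odd-index sublist
theorem rsm_slice_odds {α : Type} (xs : List α) :
    (PySem.List.slice? xs (some 1) none 2).getD [] = rsmOdds xs := by
  match xs with
  | [] => rfl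
  | x :: l =>
    simp only [PySem.List.slice?, PySem.List.sliceIndices]
    norm_num
    have hc : (if 0 < l.length then (((l.length : Int) + 2 - 1) / 2).toNat else 0)
        = (x :: l).length / 2 := by simp only [List.length_cons]; split <;> omega
    rw [hc]
    refine (List.filterMap_congr ?_).trans (rsm_filterMap_odds (x :: l))
    intro k _
    have : (1 + 2 * (k : Int)).toNat = 2 * k + 1 := by omega
    rw [this]

theorem rsmWalk_fold : ∀ (ms : List String) (x y : Int) (s : PySem.Set (Int × Int)),
    ms.foldl
      (fun (acc : Int × Int × PySem.Set (Int × Int)) m =>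
        let d := rsmDelta m
        let x := acc.1 + d.1
        let y := acc.2.1 + d.2
        (x, y, PySem.Set.add acc.2.2 (x, y)))
      (x, y, s)
    = ((rsmWalkTo (x, y) ms).1.1, (rsmWalkTo (x, y) ms).1.2,
       (rsmWalkTo (x, y) ms).2.foldl PySem.Set.add s)
  | [], x, y, s => rfl
  | m :: ms, x, y, s => by
    simp only [List.foldl_cons, rsmWalkTo, rsmWalk_fold ms, List.foldl]

-- B's walk returns the set of the post-move positions of the scan
theorem rsmWalk_eq (moves : List String) :
    rsmWalk moves = PySem.Set.ofList (rsmWalkTo (0, 0) moves).2 := by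
  rw [rsmWalk, rsmWalk_fold, PySem.Set.ofList_eq_foldl]
  rfl

theorem rsm_mod_even (t : Int) : PySem.Int.mod (2 * t) 2 = 0 := by
  rw [PySem.Int.mod_eq_emod_of_pos (by omega)]; omega

theorem rsm_mod_odd (t : Int) : ¬ PySem.Int.mod (2 * t + 1) 2 = 0 := by
  rw [PySem.Int.mod_eq_emod_of_pos (by omega)]; omega

-- A's interleaved fold from any even turn = two independent scans of the even/odd sublists
theorem rsm_foldA : ∀ (l : List String) (t x y xr yr : Int)
    (st rt : List (Int × Int)),
    (PySem.List.enumerate l (2 * t)).foldl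
      (fun (acc : Int × Int × Int × Int × List (Int × Int) × List (Int × Int)) tm =>
        let turn := tm.1
        let movement := tm.2
        let x := acc.1; let y := acc.2.1
        let xr := acc.2.2.1; let yr := acc.2.2.2.1
        let santa_trail := acc.2.2.2.2.1; let robo_santa_trail := acc.2.2.2.2.2
        if PySem.Int.mod turn 2 = 0 then
          let coords : Int × Int :=
            if movement = "^" then (x, y + 1)
            else if movement = "v" then (x, y - 1)
            else if movement = ">" then (x + 1, y)
            else (x - 1, y)
          (coords.1, coords.2, xr, yr, santa_trail ++ [coords], robo_santa_trail)
        else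
          let robo_coords : Int × Int :=
            if movement = "^" then (xr, yr + 1)
            else if movement = "v" then (xr, yr - 1)
            else if movement = ">" then (xr + 1, yr)
            else (xr - 1, yr)
          (x, y, robo_coords.1, robo_coords.2, santa_trail, robo_santa_trail ++ [robo_coords]))
      (x, y, xr, yr, st, rt)
    = ((rsmWalkTo (x, y) (rsmEvens l)).1.1, (rsmWalkTo (x, y) (rsmEvens l)).1.2,
       (rsmWalkTo (xr, yr) (rsmOdds l)).1.1, (rsmWalkTo (xr, yr) (rsmOdds l)).1.2,
       st ++ (rsmWalkTo (x, y) (rsmEvens l)).2,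
       rt ++ (rsmWalkTo (xr, yr) (rsmOdds l)).2)
  | [], t, x, y, xr, yr, st, rt => by
    simp [PySem.List.enumerate_nil, rsmEvens, rsmOdds, rsmWalkTo]
  | [a], t, x, y, xr, yr, st, rt => by
    simp only [PySem.List.enumerate_cons, PySem.List.enumerate_nil,
      List.foldl_cons, List.foldl_nil,
      rsmEvens, rsmOdds, rsmWalkTo, rsmDelta_eq, if_pos (rsm_mod_even t)]
    simp
  | a :: b :: l, t, x, y, xr, yr, st, rt => by
    have e2 : 2 * t + 1 + 1 = 2 * (t + 1) := by ring
    simp only [PySem.List.enumerate_cons, List.foldl_cons]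
    simp only [if_pos (rsm_mod_even t), if_neg (rsm_mod_odd t)]
    rw [e2, rsm_foldA l (t + 1)]
    simp only [rsmEvens, rsmOdds, rsmWalkTo, rsmDelta_eq]
    simp [List.append_assoc]

-- ===== VERDICT (by name: the statement is the Claim_ definition above) =====
theorem robo_santa_moves_spec : Claim_equal_robo_santa_moves := by
  intro line _
  show robo_santa_moves line = robo_santa_moves_alt line
  simp only [robo_santa_moves, robo_santa_moves_alt]
  rw [rsm_slice_evens, rsm_slice_odds, rsmWalk_eq, rsmWalk_eq]
  have h := rsm_foldA line 0 0 0 0 0 [] []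
  simp only [mul_zero, List.nil_append] at h
  rw [h]
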